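-- pv_equiv track=rewrite | github.com/yhussain8/sudoku_solver | solver.py | identify_region_cells
-- ===== SOURCE A (Python) =====
-- def identify_region_cells(cell_id):
--     region_0 = [
--         '0_0', '0_1', '0_2',
--         '1_0', '1_1', '1_2',
--         '2_0', '2_1', '2_2'
--     ]
--     region_1 = [
--         '0_3', '0_4', '0_5',
--         '1_3', '1_4', '1_5',
--         '2_3', '2_4', '2_5'
--     ]
--     region_2 = [
--         '0_6', '0_7', '0_8',
--         '1_6', '1_7', '1_8',
--         '2_6', '2_7', '2_8'
--     ]
--     region_3 = [
--         '3_0', '3_1', '3_2',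
--         '4_0', '4_1', '4_2',
--         '5_0', '5_1', '5_2'
--     ]
--     region_4 = [
--         '3_3', '3_4', '3_5',
--         '4_3', '4_4', '4_5',
--         '5_3', '5_4', '5_5'
--     ]
--     region_5 = [
--         '3_6', '3_7', '3_8',
--         '4_6', '4_7', '4_8',
--         '5_6', '5_7', '5_8'
--     ]
--     region_6 = [
--         '6_0', '6_1', '6_2',
--         '7_0', '7_1', '7_2',
--         '8_0', '8_1', '8_2'
--     ]
--     region_7 = [
--         '6_3', '6_4', '6_5',
--         '7_3', '7_4', '7_5',
--         '8_3', '8_4', '8_5'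
--     ]
--     region_8 = [
--         '6_6', '6_7', '6_8',
--         '7_6', '7_7', '7_8',
--         '8_6', '8_7', '8_8'
--     ]
--     regions = [
--         region_0,
--         region_1,
--         region_2,
--         region_3,
--         region_4,
--         region_5,
--         region_6,
--         region_7,
--         region_8
--     ]
--     for region in regions:
--         if cell_id in region:
--             region.remove(cell_id)
--             return region
-- ===== SOURCE B (Python) =====
-- def identify_region_cells(cell_id):
--     digits = '012345678'
--     if len(cell_id) == 3 and cell_id[1] == '_' and cell_id[0] in digits and cell_id[2] in digits:
--         row, col = ord(cell_id[0]) - 48, ord(cell_id[2]) - 48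
--         br, bc = row // 3 * 3, col // 3 * 3
--         return [f'{r}_{c}' for r in range(br, br + 3) for c in range(bc, bc + 3)
--                 if f'{r}_{c}' != cell_id]
--     return None
-- ===== Notes on version B (the rewrite author's own statement) =====
-- stated objective: simpler
-- what changed: B drops A's nine hard-coded 9-string region tables and the linear scan-and-remove over them: it parses the cell id's row/column digits, computes the 3x3 block base arithmetically (r//3*3), and generates the other eight cell ids directly.
import Mathlib
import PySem

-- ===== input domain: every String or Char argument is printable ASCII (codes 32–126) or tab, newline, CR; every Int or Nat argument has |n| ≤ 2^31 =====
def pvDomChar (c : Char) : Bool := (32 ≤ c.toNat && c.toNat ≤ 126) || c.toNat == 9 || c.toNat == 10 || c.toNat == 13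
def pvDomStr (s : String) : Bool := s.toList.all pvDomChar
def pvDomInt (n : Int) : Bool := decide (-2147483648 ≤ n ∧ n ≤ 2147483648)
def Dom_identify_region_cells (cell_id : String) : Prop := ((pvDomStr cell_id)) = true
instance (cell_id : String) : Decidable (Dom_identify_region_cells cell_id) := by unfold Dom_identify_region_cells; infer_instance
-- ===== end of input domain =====

-- B replaces A's nine hard-coded region tables and linear region scan by parsing the
-- cell id and computing its 3x3 block arithmetically (objective: simpler).

-- ===== PORT A =====
def pvRegion0 : List String := ["0_0", "0_1", "0_2", "1_0", "1_1", "1_2", "2_0", "2_1", "2_2"]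
def pvRegion1 : List String := ["0_3", "0_4", "0_5", "1_3", "1_4", "1_5", "2_3", "2_4", "2_5"]
def pvRegion2 : List String := ["0_6", "0_7", "0_8", "1_6", "1_7", "1_8", "2_6", "2_7", "2_8"]
def pvRegion3 : List String := ["3_0", "3_1", "3_2", "4_0", "4_1", "4_2", "5_0", "5_1", "5_2"]
def pvRegion4 : List String := ["3_3", "3_4", "3_5", "4_3", "4_4", "4_5", "5_3", "5_4", "5_5"]
def pvRegion5 : List String := ["3_6", "3_7", "3_8", "4_6", "4_7", "4_8", "5_6", "5_7", "5_8"]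
def pvRegion6 : List String := ["6_0", "6_1", "6_2", "7_0", "7_1", "7_2", "8_0", "8_1", "8_2"]
def pvRegion7 : List String := ["6_3", "6_4", "6_5", "7_3", "7_4", "7_5", "8_3", "8_4", "8_5"]
def pvRegion8 : List String := ["6_6", "6_7", "6_8", "7_6", "7_7", "7_8", "8_6", "8_7", "8_8"]
def pvRegions : List (List String) :=
  [pvRegion0, pvRegion1, pvRegion2, pvRegion3, pvRegion4, pvRegion5, pvRegion6, pvRegion7, pvRegion8]

-- the 'for region in regions' loop: first region containing cell_id, with cell_id removed
def pvALoop (cell_id : String) : List (List String) → Option (List String)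
  | [] => none
  | region :: rest =>
      if cell_id ∈ region then PySem.List.remove? region cell_id
      else pvALoop cell_id rest

def identify_region_cells (cell_id : String) : Option (List String) :=
  pvALoop cell_id pvRegions

-- ===== PORT B =====
def pvDigits : List Char := ['0', '1', '2', '3', '4', '5', '6', '7', '8']

-- f'{r}_{c}'
def pvCellStr (r c : Int) : String :=
  String.ofList (PySem.Int.toChars r ++ '_' :: PySem.Int.toChars c)

def identify_region_cells_alt (cell_id : String) : Option (List String) :=
  match cell_id.toList with   -- len(cell_id) == 3 with its three characters
  | [r, u, c] =>
      if u == '_' && pvDigits.contains r && pvDigits.contains c then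
        let row : Int := (r.toNat : Int) - 48
        let col : Int := (c.toNat : Int) - 48
        let br : Int := PySem.Int.floordiv row 3 * 3
        let bc : Int := PySem.Int.floordiv col 3 * 3
        some ((PySem.List.pyRange br (br + 3) 1).flatMap fun rr =>
          (PySem.List.pyRange bc (bc + 3) 1).filterMap fun cc =>
            if pvCellStr rr cc ≠ cell_id then some (pvCellStr rr cc) else none)
      else none
  | _ => none

-- ===== PRECONDITION & SPEC =====
def Spec_identify_region_cells (cell_id : String) (out : Option (List String)) : Prop := out = identify_region_cells_alt cell_id
instance (cell_id : String) (out : Option (List String)) : Decidable (Spec_identify_region_cells cell_id out) := by unfold Spec_identify_region_cells; infer_instance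

-- ===== CLAIM (what is proved, stated in full; the proofs are below) =====
def Claim_equal_identify_region_cells : Prop := ∀ (cell_id : String), Dom_identify_region_cells cell_id → Spec_identify_region_cells cell_id (identify_region_cells cell_id)

-- ===== LEMMAS AND PROOFS =====

-- B's guard, as a standalone test on the string
def pvGuard (s : String) : Bool :=
  match s.toList with
  | [r, u, c] => u == '_' && pvDigits.contains r && pvDigits.contains c
  | _ => false

lemma pvGuard_of_mem_region : ∀ t ∈ pvRegions.flatten, pvGuard t = true := by decide

lemma pvALoop_none (cell_id : String) (regs : List (List String))
    (h : ∀ reg ∈ regs, cell_id ∉ reg) : pvALoop cell_id regs = none := by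
  induction regs with
  | nil => rfl
  | cons reg rest ih =>
      simp only [pvALoop]
      rw [if_neg (h reg (List.mem_cons_self))]
      exact ih fun r hr => h r (List.mem_cons_of_mem _ hr)

lemma pv_eq_of_guard_false (s : String) (hg : pvGuard s = false) :
    identify_region_cells s = identify_region_cells_alt s := by
  have hA : identify_region_cells s = none := by
    apply pvALoop_none
    intro reg hreg hmem
    have := pvGuard_of_mem_region s (List.mem_flatten.mpr ⟨reg, hreg, hmem⟩)
    rw [hg] at this
    exact Bool.false_ne_true this
  rw [hA]
  rcases h : s.toList with _ | ⟨r, _ | ⟨u, _ | ⟨c, _ | ⟨d, rest⟩⟩⟩⟩ <;>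
    simp only [identify_region_cells_alt, h]
  rw [show (u == '_' && pvDigits.contains r && pvDigits.contains c) = false from by
        simpa [pvGuard, h] using hg]
  simp

lemma pv_eq_of_guard_true (s : String) (hg : pvGuard s = true) :
    identify_region_cells s = identify_region_cells_alt s := by
  rcases h : s.toList with _ | ⟨r, _ | ⟨u, _ | ⟨c, _ | ⟨d, rest⟩⟩⟩⟩ <;>
    simp only [pvGuard, h, Bool.and_eq_true, beq_iff_eq, List.contains_iff_mem] at hg <;>
    try exact absurd hg (by decide)
  obtain ⟨⟨hu, hr'⟩, hc'⟩ := hg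
  subst hu
  have hs : String.ofList s.toList = s := String.ofList_toList (s := s)
  rw [h] at hs
  subst hs
  fin_cases hr' <;> fin_cases hc' <;> decide

-- ===== VERDICT (by name: the statement is the Claim_ definition above) =====
theorem identify_region_cells_spec : Claim_equal_identify_region_cells := by
  intro s _
  unfold Spec_identify_region_cells
  cases hg : pvGuard s with
  | false => exact pv_eq_of_guard_false s hg
  | true => exact pv_eq_of_guard_true s hg
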